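-- pv_equiv track=rewrite | github.com/737675/github_repo | Task_Scheduling.py | max_tasks
-- ===== SOURCE A (Python) =====
-- import heapq
--
-- def max_tasks(tasks):
--     tasks.sort(key=lambda x: x['deadline'])  # Step 1: Sort by deadline
--     total_time = 0
--     max_heap = []
--
--     for task in tasks:
--         heapq.heappush(max_heap, -task['duration'])  # use negative to simulate max heap
--         total_time += task['duration']
--
--         if total_time > task['deadline']:
--             removed = heapq.heappop(max_heap)
--             total_time += removed  # remove longest duration task
--
--     return len(max_heap)
-- ===== SOURCE B (Python) =====
-- def max_tasks(tasks):
--     tasks.sort(key=lambda x: x['deadline'])  # same in-place sort side effect as A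
--     selected = []
--     total_time = 0
--     for task in tasks:
--         selected.append(task['duration'])
--         total_time += task['duration']
--         if total_time > task['deadline']:
--             m = max(selected)
--             selected.remove(m)
--             total_time -= m
--     return len(selected)
-- ===== Notes on version B (the rewrite author's own statement) =====
-- stated objective: simpler
-- what changed: Replaces the negated max-heap with a plain list of selected durations: on deadline overflow B scans for the maximum with max() and removes that one element, instead of heap push/pop.
import Mathlib
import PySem

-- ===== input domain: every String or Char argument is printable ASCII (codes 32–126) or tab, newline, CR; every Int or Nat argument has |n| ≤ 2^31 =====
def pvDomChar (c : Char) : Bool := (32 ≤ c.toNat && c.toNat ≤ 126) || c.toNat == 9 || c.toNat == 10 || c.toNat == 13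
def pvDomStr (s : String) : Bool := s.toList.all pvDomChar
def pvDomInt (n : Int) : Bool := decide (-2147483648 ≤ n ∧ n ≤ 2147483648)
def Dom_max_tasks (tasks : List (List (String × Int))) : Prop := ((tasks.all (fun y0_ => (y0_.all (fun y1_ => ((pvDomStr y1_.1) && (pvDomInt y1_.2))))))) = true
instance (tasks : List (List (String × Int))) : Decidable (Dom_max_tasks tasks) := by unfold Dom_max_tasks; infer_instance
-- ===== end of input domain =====

-- B replaces A's negated max-heap by a plain list of selected durations with a linear
-- max scan + remove on overflow (objective: simpler). A sorts `tasks` in place; B performs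
-- the same in-place sort; the equivalence proved here is about the return value.

-- ===== PORT A =====
-- task['k'] : dict lookup (first match); total under Pre_ (KeyError excluded by Pre_)
def dGet (t : List (String × Int)) (k : String) : Int :=
  (PySem.Dict.get? (PySem.Dict.ofList t) k).getD 0

-- heapq.heappush / heappop ported by heapq's observable semantics (the heap's multiset and
-- min-pop), exact for everything A observes: push appends, pop returns the minimum value and
-- the multiset with one minimal element removed.
def pyHeapPush (h : List Int) (x : Int) : List Int := h ++ [x]

def pyHeapPop? (h : List Int) : Option (Int × List Int) :=
  match PySem.List.min? h (fun y => y) with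
  | none => none
  | some m => some (m, h.erase m)

def stepA (st : List Int × Int) (task : List (String × Int)) : List Int × Int :=
  let heap := pyHeapPush st.1 (-(dGet task "duration"))
  let total := st.2 + dGet task "duration"
  if total > dGet task "deadline" then
    match pyHeapPop? heap with
    | some (removed, heap') => (heap', total + removed)
    | none => (heap, total)   -- unreachable: heap was just pushed to
  else (heap, total)

def max_tasks (tasks : List (List (String × Int))) : Int :=
  (((PySem.List.sorted tasks (fun t => dGet t "deadline") false).foldl stepA ([], 0)).1.length : Int)

-- ===== PORT B =====
def stepB (st : List Int × Int) (task : List (String × Int)) : List Int × Int :=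
  let d := dGet task "duration"
  let sel := st.1 ++ [d]
  let total := st.2 + d
  if total > dGet task "deadline" then
    match PySem.List.max? sel (fun y => y) with
    | some m =>
      match PySem.List.remove? sel m with
      | some sel' => (sel', total - m)
      | none => (sel, total)   -- unreachable: m ∈ sel
    | none => (sel, total)     -- unreachable: sel nonempty
  else (sel, total)

def max_tasks_alt (tasks : List (List (String × Int))) : Int :=
  (((PySem.List.sorted tasks (fun t => dGet t "deadline") false).foldl stepB ([], 0)).1.length : Int)

-- ===== PRECONDITION & SPEC =====
-- Pre_ excludes exactly the inputs where Python A raises KeyError: a task missing the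
-- 'deadline' or 'duration' key.
def Pre_max_tasks (tasks : List (List (String × Int))) : Prop :=
  ∀ t ∈ tasks, (PySem.Dict.contains (PySem.Dict.ofList t) "deadline") = true ∧
               (PySem.Dict.contains (PySem.Dict.ofList t) "duration") = true
instance (tasks : List (List (String × Int))) : Decidable (Pre_max_tasks tasks) := by
  unfold Pre_max_tasks; infer_instance

def pvWitness_max_tasks : (List (List (String × Int))) :=
  [[("deadline", 4), ("duration", 2)], [("deadline", 5), ("duration", 4)]]

def Spec_max_tasks (tasks : List (List (String × Int))) (out : Int) : Prop := out = max_tasks_alt tasks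
instance (tasks : List (List (String × Int))) (out : Int) : Decidable (Spec_max_tasks tasks out) := by
  unfold Spec_max_tasks; infer_instance

-- ===== CLAIM (what is proved, stated in full; the proofs are below) =====
def Claim_equal_max_tasks : Prop := ∀ (tasks : List (List (String × Int))), Dom_max_tasks tasks → Pre_max_tasks tasks → Spec_max_tasks tasks (max_tasks tasks)

-- ===== LEMMAS AND PROOFS =====

-- min of the negations is the negation of the max (running-fold form)
theorem foldl_min_neg (t : List Int) (x : Int) :
    (t.map (fun y => -y)).foldl min (-x) = -(t.foldl max x) := by
  induction t generalizing x with
  | nil => rfl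
  | cons a t ih =>
      simp only [List.map_cons, List.foldl_cons]
      rw [show min (-x) (-a) = -(max x a) by omega]
      exact ih (max x a)

theorem min?_map_neg (sel : List Int) :
    PySem.List.min? (sel.map (fun y => -y)) (fun y => y) =
      (PySem.List.max? sel (fun y => y)).map (fun y => -y) := by
  cases sel with
  | nil => rfl
  | cons x t =>
      rw [show (x :: t).map (fun y => -y) = (-x) :: t.map (fun y => -y) by simp]
      rw [PySem.List.min?_id_cons, PySem.List.max?_id_cons]
      simp [foldl_min_neg]

-- erasing -m from the negations is the negation of erasing m
theorem erase_map_neg (sel : List Int) (m : Int) :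
    (sel.map (fun y => -y)).erase (-m) = (sel.erase m).map (fun y => -y) := by
  induction sel with
  | nil => rfl
  | cons a t ih =>
      by_cases h : a = m
      · subst h; simp
      · have h' : (-a) ≠ (-m) := by omega
        simp only [List.map_cons, List.erase_cons]
        simp [h, h', ih]

theorem stepA_eq_stepB (sel : List Int) (total : Int) (task : List (String × Int)) :
    stepA (sel.map (fun y => -y), total) task =
      ((stepB (sel, total) task).1.map (fun y => -y), (stepB (sel, total) task).2) := by
  unfold stepA stepB pyHeapPush pyHeapPop?
  simp only []
  set d := dGet task "duration" with hd
  have hmap : sel.map (fun y => -y) ++ [-d] = (sel ++ [d]).map (fun y => -y) := by simp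
  rw [hmap]
  by_cases hc : total + d > dGet task "deadline"
  · simp only [if_pos hc]
    rw [min?_map_neg]
    obtain ⟨m, hm⟩ : ∃ m, PySem.List.max? (sel ++ [d]) (fun y => y) = some m := by
      cases h : PySem.List.max? (sel ++ [d]) (fun y => y) with
      | none => exact absurd ((PySem.List.max?_eq_none_iff _ _).mp h) (by simp)
      | some m => exact ⟨m, rfl⟩
    have hmem : m ∈ sel ++ [d] := PySem.List.max?_mem hm
    rw [hm]
    simp only [Option.map_some]
    rw [PySem.List.remove?_eq_some_erase (sel ++ [d]) m hmem]
    simp only [Prod.mk.injEq]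
    exact ⟨by rw [erase_map_neg], by omega⟩
  · simp [if_neg hc]

theorem foldl_eq (S : List (List (String × Int))) (sel : List Int) (total : Int) :
    S.foldl stepA (sel.map (fun y => -y), total) =
      ((S.foldl stepB (sel, total)).1.map (fun y => -y), (S.foldl stepB (sel, total)).2) := by
  induction S generalizing sel total with
  | nil => rfl
  | cons task S ih =>
      simp only [List.foldl_cons]
      rw [stepA_eq_stepB]
      exact ih _ _

-- ===== VERDICT (by name: the statement is the Claim_ definition above) =====
theorem max_tasks_spec : Claim_equal_max_tasks := by
  intro tasks _ _
  unfold Spec_max_tasks max_tasks max_tasks_alt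
  have h := foldl_eq (PySem.List.sorted tasks (fun t => dGet t "deadline") false) [] 0
  simp only [List.map_nil] at h
  rw [h]
  simp
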